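-- pv_equiv track=rewrite | github.com/CozminRebeja/python-course-01 | 2/2.5-makeMyBill.py | hourCalc
-- ===== SOURCE A (Python) =====
-- def hourCalc(hours):
--     total = 0
--     for hour in range(hours):
--         if hour < 40:
--             total += 50
--         else:
--             total += 100
--
--     return total
-- ===== SOURCE B (Python) =====
-- def hourCalc(hours):
--     h = max(hours, 0)
--     return min(h, 40) * 50 + max(h - 40, 0) * 100
-- ===== Notes on version B (the rewrite author's own statement) =====
-- stated objective: faster
-- what changed: Replaces the per-hour loop with a closed-form expression min(h,40)*50 + max(h-40,0)*100.
import Mathlib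
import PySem

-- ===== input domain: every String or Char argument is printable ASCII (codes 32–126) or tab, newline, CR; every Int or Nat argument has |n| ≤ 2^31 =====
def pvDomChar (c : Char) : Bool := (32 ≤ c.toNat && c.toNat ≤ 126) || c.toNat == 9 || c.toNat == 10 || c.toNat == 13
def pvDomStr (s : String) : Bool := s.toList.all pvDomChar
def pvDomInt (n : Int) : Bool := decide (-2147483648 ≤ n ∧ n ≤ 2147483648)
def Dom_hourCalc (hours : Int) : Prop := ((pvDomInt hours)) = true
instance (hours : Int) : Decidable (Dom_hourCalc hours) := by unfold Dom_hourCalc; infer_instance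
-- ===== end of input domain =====

-- B replaces A's per-hour loop with a closed-form expression (O(1) vs O(n)).

-- ===== PORT A =====
def hourCalc (hours : Int) : Int :=
  (PySem.List.pyRange 0 hours 1).foldl
    (fun total hour => if hour < 40 then total + 50 else total + 100) 0

-- ===== PORT B =====
def hourCalc_alt (hours : Int) : Int :=
  min (max hours 0) 40 * 50 + max (max hours 0 - 40) 0 * 100

-- ===== PRECONDITION & SPEC =====
def Spec_hourCalc (hours : Int) (out : Int) : Prop := out = hourCalc_alt hours
instance (hours : Int) (out : Int) : Decidable (Spec_hourCalc hours out) := by unfold Spec_hourCalc; infer_instance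

-- ===== CLAIM (what is proved, stated in full; the proofs are below) =====
def Claim_equal_hourCalc : Prop := ∀ (hours : Int), Dom_hourCalc hours → Spec_hourCalc hours (hourCalc hours)

-- ===== LEMMAS AND PROOFS =====

-- loop value over range(0, b) as a closed form, by induction on the upper bound
theorem hourCalc_loop_closed (n : Nat) :
    (PySem.List.pyRange 0 (n : Int) 1).foldl
      (fun total hour => if hour < 40 then total + 50 else total + 100) 0
    = min (n : Int) 40 * 50 + max ((n : Int) - 40) 0 * 100 := by
  induction n with
  | zero => simp [PySem.List.pyRange_one_eq_nil]
  | succ k ih =>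
    have h : (((k + 1 : Nat) : Int)) = (k : Int) + 1 := by push_cast; ring
    rw [h, PySem.List.pyRange_one_succ_right (by exact_mod_cast Int.natCast_nonneg k),
        List.foldl_append, ih]
    simp only [List.foldl]
    by_cases hk : (k : Int) < 40
    · rw [if_pos hk]; omega
    · rw [if_neg hk]; omega

-- ===== VERDICT (by name: the statement is the Claim_ definition above) =====
theorem hourCalc_spec : Claim_equal_hourCalc := by
  intro hours _
  unfold Spec_hourCalc hourCalc hourCalc_alt
  by_cases h : hours ≤ 0
  · rw [PySem.List.pyRange_one_eq_nil h]
    simp only [List.foldl]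
    omega
  · obtain ⟨n, rfl⟩ : ∃ n : Nat, hours = (n : Int) :=
      ⟨hours.toNat, (Int.toNat_of_nonneg (by omega)).symm⟩
    rw [hourCalc_loop_closed]
    omega
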